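-- pv_equiv track=rewrite | github.com/DilermandoQueiroz/Cowboy | algebrageo.py | pexterno
-- ===== SOURCE A (Python) =====
-- def analisesoma(mult):
--     for c in range(0, len(mult)):
--         for k in range(c+1, len(mult)):
--             if (mult[k][1] == mult[c][1]):
--                 mult[c][0] = mult[c][0]+mult[k][0]
--                 mult[k][0] = 0
--
--     multr=list()
--
--     for c in range(0, len(mult)):
--         if (mult[c][0] != 0):
--             multr.append([mult[c][0], mult[c][1]])
--
--     multr.sort(key=sortSecond)
--
--     return multr
--
-- def sortSecond(val):
--     return val[1]
--
-- def pexterno(mult1,mult2):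
--     multr = list()
--     coef=0
--     masc=0
--
--     for c in range(0,len(mult1)):
--         for k in range(0,len(mult2)):
--             coef,masc = pexterno2(mult1[c][0],mult1[c][1],mult2[k][0],mult2[k][1])
--             multr.append([coef, masc])
--
--     multr = analisesoma(multr)
--
--     return multr
--
-- def pexterno2(coef1,masc1,coef2,masc2):
--     mascr = 0
--     coefr = coef1*coef2
--     sinal = 0
--     if (masc1 & masc2) == 0:
--         sinal = reordenacanonica(masc1, masc2)
--         mascr = masc1|masc2
--         coefr = sinal * coef1 * coef2
--     else:
--         mascr = 0
--         coefr = 0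
--
--     return coefr, mascr
--
-- def reordenacanonica(masc1,masc2):
--     trocas=0
--     masc1=masc1>>1
--     while masc1!=0:
--         trocas=trocas+colisoes(masc1 & masc2)
--         masc1=masc1>>1
--     if (trocas & 1) == 0:
--         sinalr=1
--     else:
--         sinalr=-1
--
--     return sinalr
--
-- def colisoes(masc):
--     if masc == 5:
--         masc=4
--     elif masc==4:
--         masc=3
--     elif masc==3:
--         masc=2
--     elif masc!=0:
--         masc=1
--     return masc
-- ===== SOURCE B (Python) =====
-- # Exterior product of two multivectors. Instead of the original's O(T^2) pairwise
-- # merge of like terms (analisesoma), aggregate the coefficients in a dict keyed by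
-- # blade mask in one pass, then filter zeros and sort by mask. The sign of each
-- # term reproduces the original's collision-counter parity rule.
-- def _term(c1, m1, c2, m2):
--     if m1 & m2 == 0:
--         s = 1
--         m = m1 >> 1
--         while m != 0:
--             if (m & m2) not in (0, 3, 5):
--                 s = -s
--             m >>= 1
--         return s * c1 * c2, m1 | m2
--     return 0, 0
--
-- def pexterno(mult1, mult2):
--     acc = {}
--     for r1 in mult1:
--         for r2 in mult2:
--             c, m = _term(r1[0], r1[1], r2[0], r2[1])
--             acc[m] = acc.get(m, 0) + c
--     return sorted(([v, k] for k, v in acc.items() if v != 0), key=lambda r: r[1])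
-- ===== Notes on version B (the rewrite author's own statement) =====
-- stated objective: alternative
-- what changed: A collects every pairwise term in a list and merges like terms with a quadratic double index scan (analisesoma) before filtering and sorting; B accumulates each term's coefficient in a dict keyed by blade mask in one pass, then filters zero sums and sorts by mask (intended as asymptotically lighter aggregation, O(nm) vs O((nm)^2); a timing run could not confirm it, so no speed is claimed).
import Mathlib
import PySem

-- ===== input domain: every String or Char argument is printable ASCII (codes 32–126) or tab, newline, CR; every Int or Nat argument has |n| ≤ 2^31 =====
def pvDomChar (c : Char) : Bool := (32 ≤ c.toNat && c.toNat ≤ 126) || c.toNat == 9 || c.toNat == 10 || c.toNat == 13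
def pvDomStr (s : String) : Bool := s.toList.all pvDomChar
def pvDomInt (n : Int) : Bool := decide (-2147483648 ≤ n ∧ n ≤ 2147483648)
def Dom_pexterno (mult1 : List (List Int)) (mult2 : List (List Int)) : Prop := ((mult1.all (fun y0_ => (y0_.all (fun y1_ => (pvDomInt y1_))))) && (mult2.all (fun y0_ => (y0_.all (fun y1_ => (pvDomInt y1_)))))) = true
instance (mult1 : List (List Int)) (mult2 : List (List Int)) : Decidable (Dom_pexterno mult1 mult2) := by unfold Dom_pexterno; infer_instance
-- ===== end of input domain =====

-- B replaces A's quadratic pairwise merge of like terms (analisesoma) by a dict keyed by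
-- blade mask that accumulates coefficients in one pass, then filters zeros and sorts by mask
-- (a structurally different aggregation; no speed is claimed).

-- ===== PORT A =====
def colisoes (masc : Int) : Int :=
  if masc = 5 then 4
  else if masc = 4 then 3
  else if masc = 3 then 2
  else if masc ≠ 0 then 1
  else masc

-- the 'while masc1 != 0' loop of reordenacanonica; the fuel (bitLength + 1) bounds its
-- iteration count for masc1 ≥ 0 (each step shifts right); for masc1 < 0 the Python loop
-- diverges — those inputs are excluded by Pre_pexterno.
def reordLoop : Nat → Int → Int → Int → Int
  | 0, _, _, trocas => trocas
  | fuel+1, masc1, masc2, trocas =>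
      if masc1 = 0 then trocas
      else reordLoop fuel (masc1 >>> 1) masc2 (trocas + colisoes (PySem.Int.band masc1 masc2))

def reordenacanonica (masc1 masc2 : Int) : Int :=
  let m := masc1 >>> 1
  let trocas := reordLoop (PySem.Int.bitLength m + 1) m masc2 0
  if PySem.Int.band trocas 1 = 0 then 1 else -1

def pexterno2 (coef1 masc1 coef2 masc2 : Int) : Int × Int :=
  if PySem.Int.band masc1 masc2 = 0 then
    (reordenacanonica masc1 masc2 * coef1 * coef2, PySem.Int.bor masc1 masc2)
  else (0, 0)

-- body of the nested 'for c … for k …' merge loop of analisesoma (indices always in range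
-- at every call site, so pyGetD/pySetD defaults never fire — exact)
def asomaStep (m : List (List Int)) (c k : Int) : List (List Int) :=
  if PySem.List.pyGetD (PySem.List.pyGetD m k []) 1 0 = PySem.List.pyGetD (PySem.List.pyGetD m c []) 1 0 then
    let m1 := PySem.List.pySetD m c
        (PySem.List.pySetD (PySem.List.pyGetD m c []) 0
          (PySem.List.pyGetD (PySem.List.pyGetD m c []) 0 0 + PySem.List.pyGetD (PySem.List.pyGetD m k []) 0 0))
    PySem.List.pySetD m1 k (PySem.List.pySetD (PySem.List.pyGetD m1 k []) 0 0)
  else m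

def sortSecond (val : List Int) : Int := PySem.List.pyGetD val 1 0

def analisesoma (mult : List (List Int)) : List (List Int) :=
  let mult := (PySem.List.pyRange 0 (PySem.List.len mult)).foldl
    (fun m c => (PySem.List.pyRange (c+1) (PySem.List.len m)).foldl (fun m' k => asomaStep m' c k) m) mult
  let multr := (PySem.List.pyRange 0 (PySem.List.len mult)).foldl
    (fun acc c =>
      if PySem.List.pyGetD (PySem.List.pyGetD mult c []) 0 0 ≠ 0 then
        acc ++ [[PySem.List.pyGetD (PySem.List.pyGetD mult c []) 0 0,
                 PySem.List.pyGetD (PySem.List.pyGetD mult c []) 1 0]]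
      else acc) []
  PySem.List.sorted multr sortSecond false

def pexterno (mult1 : List (List Int)) (mult2 : List (List Int)) : List (List Int) :=
  let multr := (PySem.List.pyRange 0 (PySem.List.len mult1)).foldl
    (fun acc c => (PySem.List.pyRange 0 (PySem.List.len mult2)).foldl
      (fun acc2 k =>
        acc2 ++ [[(pexterno2 (PySem.List.pyGetD (PySem.List.pyGetD mult1 c []) 0 0)
                             (PySem.List.pyGetD (PySem.List.pyGetD mult1 c []) 1 0)
                             (PySem.List.pyGetD (PySem.List.pyGetD mult2 k []) 0 0)
                             (PySem.List.pyGetD (PySem.List.pyGetD mult2 k []) 1 0)).1,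
                  (pexterno2 (PySem.List.pyGetD (PySem.List.pyGetD mult1 c []) 0 0)
                             (PySem.List.pyGetD (PySem.List.pyGetD mult1 c []) 1 0)
                             (PySem.List.pyGetD (PySem.List.pyGetD mult2 k []) 0 0)
                             (PySem.List.pyGetD (PySem.List.pyGetD mult2 k []) 1 0)).2]]) acc) []
  analisesoma multr

-- ===== PORT B =====
-- the 'while m != 0' sign loop of Source B's _term; same fuel bound remark as reordLoop
def signLoop : Nat → Int → Int → Int → Int
  | 0, _, _, s => s
  | fuel+1, m, m2, s =>
      if m = 0 then s
      else signLoop fuel (m >>> 1) m2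
        (if PySem.Int.band m m2 = 0 ∨ PySem.Int.band m m2 = 3 ∨ PySem.Int.band m m2 = 5 then s else -s)

def termAlt (c1 m1 c2 m2 : Int) : Int × Int :=
  if PySem.Int.band m1 m2 = 0 then
    (signLoop (PySem.Int.bitLength (m1 >>> 1) + 1) (m1 >>> 1) m2 1 * c1 * c2, PySem.Int.bor m1 m2)
  else (0, 0)

def pexterno_alt (mult1 : List (List Int)) (mult2 : List (List Int)) : List (List Int) :=
  let acc : PySem.Dict Int Int := mult1.foldl (fun acc r1 =>
      mult2.foldl (fun acc r2 =>
        acc.insert (termAlt (PySem.List.pyGetD r1 0 0) (PySem.List.pyGetD r1 1 0)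
                            (PySem.List.pyGetD r2 0 0) (PySem.List.pyGetD r2 1 0)).2
          (acc.getD (termAlt (PySem.List.pyGetD r1 0 0) (PySem.List.pyGetD r1 1 0)
                             (PySem.List.pyGetD r2 0 0) (PySem.List.pyGetD r2 1 0)).2 0 +
           (termAlt (PySem.List.pyGetD r1 0 0) (PySem.List.pyGetD r1 1 0)
                    (PySem.List.pyGetD r2 0 0) (PySem.List.pyGetD r2 1 0)).1)) acc) PySem.Dict.empty
  PySem.List.sorted ((acc.items.filter (fun kv => decide (kv.2 ≠ 0))).map (fun kv => [kv.2, kv.1]))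
    (fun r => PySem.List.pyGetD r 1 0) false

-- ===== PRECONDITION & SPEC =====
-- Pre_ admits exactly the inputs on which the Python A returns: when both lists are nonempty
-- every row needs at least two entries (else A raises IndexError), and no reachable pair may
-- have a negative first mask disjoint from the second mask (else A's shift loop diverges).
-- The Lean ports are total (pyGetD defaults, fuel), and they agree on ALL inputs, so the
-- equivalence proof does not need to consume Pre_; Pre_ only marks where the Python A returns.
def Pre_pexterno (mult1 : List (List Int)) (mult2 : List (List Int)) : Prop :=
  mult1 = [] ∨ mult2 = [] ∨
  ((∀ r ∈ mult1, 2 ≤ r.length) ∧ (∀ r ∈ mult2, 2 ≤ r.length) ∧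
   ∀ r1 ∈ mult1, ∀ r2 ∈ mult2,
     0 ≤ r1.getD 1 0 ∨ PySem.Int.band (r1.getD 1 0) (r2.getD 1 0) ≠ 0)
instance (mult1 : List (List Int)) (mult2 : List (List Int)) : Decidable (Pre_pexterno mult1 mult2) := by
  unfold Pre_pexterno; infer_instance

def pvWitness_pexterno : List (List Int) × List (List Int) := ([[1, 1], [2, 2]], [[3, 2], [-1, 4]])

def Spec_pexterno (mult1 : List (List Int)) (mult2 : List (List Int)) (out : List (List Int)) : Prop :=
  out = pexterno_alt mult1 mult2
instance (mult1 : List (List Int)) (mult2 : List (List Int)) (out : List (List Int)) : Decidable (Spec_pexterno mult1 mult2 out) := by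
  unfold Spec_pexterno; infer_instance

-- ===== CLAIM (what is proved, stated in full; the proofs are below) =====
def Claim_equal_pexterno : Prop := ∀ (mult1 : List (List Int)) (mult2 : List (List Int)), Dom_pexterno mult1 mult2 → Pre_pexterno mult1 mult2 → Spec_pexterno mult1 mult2 (pexterno mult1 mult2)

-- ===== LEMMAS AND PROOFS =====

-- spec-level vocabulary --------------------------------------------------------------
def l2r (T : List (Int × Int)) : List (List Int) := T.map (fun p => [p.1, p.2])

def pterm (r1 r2 : List Int) : Int × Int :=
  pexterno2 (PySem.List.pyGetD r1 0 0) (PySem.List.pyGetD r1 1 0)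
            (PySem.List.pyGetD r2 0 0) (PySem.List.pyGetD r2 1 0)

def termsOf (mult1 mult2 : List (List Int)) : List (Int × Int) :=
  mult1.flatMap (fun r1 => mult2.map (pterm r1))

def sumM (m : Int) (t : List (Int × Int)) : Int :=
  ((t.filter (fun p => decide (p.2 = m))).map (fun p => p.1)).sum

def zeroM (m : Int) (t : List (Int × Int)) : List (Int × Int) :=
  t.map (fun p => if p.2 = m then (0, p.2) else p)

def core : List (Int × Int) → List (Int × Int)
  | [] => []
  | (c, m) :: t => (c + sumM m t, m) :: core (zeroM m t)
  termination_by l => l.length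
  decreasing_by simp [zeroM]

def maskList (T : List (Int × Int)) : List Int := PySem.Set.ofList (T.map (fun p => p.2))

def aggOf (T : List (Int × Int)) : List (Int × Int) :=
  ((maskList T).filter (fun m => decide (sumM m T ≠ 0))).map (fun m => (sumM m T, m))

def asomaFix (n : Int) (mult : List (List Int)) : List (List Int) :=
  (PySem.List.pyRange 0 n).foldl
    (fun m c => (PySem.List.pyRange (c+1) n).foldl (fun m' k => asomaStep m' c k) m) mult

-- term-level equality of the two per-pair computations ------------------------------
lemma reord_shift : ∀ (fuel : Nat) (m m2 tr : Int),
    reordLoop fuel m m2 tr = tr + reordLoop fuel m m2 0 := by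
  intro fuel
  induction fuel with
  | zero => intro m m2 tr; simp [reordLoop]
  | succ f ih =>
    intro m m2 tr
    by_cases hm : m = 0
    · simp [reordLoop, hm]
    · simp only [reordLoop, hm, ite_false]
      rw [ih (m >>> 1) m2 (tr + colisoes (PySem.Int.band m m2)),
          ih (m >>> 1) m2 (0 + colisoes (PySem.Int.band m m2))]
      ring

lemma colisoes_parity (x : Int) :
    PySem.Int.mod (colisoes x) 2 = if x = 0 ∨ x = 3 ∨ x = 5 then 0 else 1 := by
  unfold colisoes
  split_ifs <;> simp_all

lemma sign_reord : ∀ (fuel : Nat) (m m2 s : Int),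
    signLoop fuel m m2 s = if PySem.Int.mod (reordLoop fuel m m2 0) 2 = 0 then s else -s := by
  intro fuel
  induction fuel with
  | zero => intro m m2 s; simp [signLoop, reordLoop]
  | succ f ih =>
    intro m m2 s
    by_cases hm : m = 0
    · simp [signLoop, reordLoop, hm]
    · simp only [signLoop, reordLoop, hm, ite_false]
      rw [ih, reord_shift f (m >>> 1) m2 (0 + colisoes (PySem.Int.band m m2))]
      have hcol := colisoes_parity (PySem.Int.band m m2)
      have h2 : (0:Int) < 2 := by norm_num
      rw [PySem.Int.mod_eq_emod_of_pos h2] at hcol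
      rw [PySem.Int.mod_eq_emod_of_pos h2, PySem.Int.mod_eq_emod_of_pos h2]
      set cc := colisoes (PySem.Int.band m m2) with hcc
      set R := reordLoop f (m >>> 1) m2 0 with hR
      by_cases hin : PySem.Int.band m m2 = 0 ∨ PySem.Int.band m m2 = 3 ∨ PySem.Int.band m m2 = 5
      · rw [if_pos hin] at hcol; rw [if_pos hin]
        split_ifs with ha hb <;> first | rfl | (exact absurd hb (by omega)) | (exact absurd ha (by omega))
      · rw [if_neg hin] at hcol; rw [if_neg hin]
        split_ifs with ha hb
        · exact absurd hb (by omega)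
        · rfl
        · rw [neg_neg]
        · exact absurd ha (by omega)

lemma term_eq (c1 m1 c2 m2 : Int) : termAlt c1 m1 c2 m2 = pexterno2 c1 m1 c2 m2 := by
  unfold termAlt pexterno2 reordenacanonica
  by_cases h : PySem.Int.band m1 m2 = 0
  · simp only [if_pos h, sign_reord, PySem.Int.band_one]
  · rw [if_neg h, if_neg h]

-- A: the pair loop builds l2r (termsOf …) -------------------------------------------
lemma A_terms (mult1 mult2 : List (List Int)) :
    pexterno mult1 mult2 = analisesoma (l2r (termsOf mult1 mult2)) := by
  unfold pexterno
  refine congrArg analisesoma ?_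
  have hinner : ∀ (r1 : List Int) (acc : List (List Int)),
      (PySem.List.pyRange 0 (PySem.List.len mult2)).foldl
        (fun acc2 k =>
          acc2 ++ [[(pterm r1 (PySem.List.pyGetD mult2 k [])).1,
                    (pterm r1 (PySem.List.pyGetD mult2 k [])).2]]) acc
        = acc ++ (mult2.map (pterm r1)).map (fun p => [p.1, p.2]) := by
    intro r1 acc
    have h1 := PySem.List.foldl_pyRange_zero_pyGetD mult2 []
      (fun acc2 r2 => acc2 ++ [[(pterm r1 r2).1, (pterm r1 r2).2]]) acc
    have h2 := PySem.List.foldl_append_singleton_eq_map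
      (fun r2 => [(pterm r1 r2).1, (pterm r1 r2).2]) mult2 acc
    have h3 : (mult2.map (fun r2 => [(pterm r1 r2).1, (pterm r1 r2).2]))
        = (mult2.map (pterm r1)).map (fun p => [p.1, p.2]) := by
      rw [List.map_map]; rfl
    exact h1.trans (h2.trans (by rw [h3]))
  have hfun : (fun (acc : List (List Int)) (c : Int) =>
        (PySem.List.pyRange 0 (PySem.List.len mult2)).foldl
          (fun acc2 k =>
            acc2 ++ [[(pterm (PySem.List.pyGetD mult1 c []) (PySem.List.pyGetD mult2 k [])).1,
                      (pterm (PySem.List.pyGetD mult1 c []) (PySem.List.pyGetD mult2 k [])).2]]) acc)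
      = (fun (acc : List (List Int)) (c : Int) =>
          acc ++ (mult2.map (pterm (PySem.List.pyGetD mult1 c []))).map (fun p => [p.1, p.2])) := by
    funext acc c
    exact hinner (PySem.List.pyGetD mult1 c []) acc
  show (PySem.List.pyRange 0 (PySem.List.len mult1)).foldl
      (fun acc c =>
        (PySem.List.pyRange 0 (PySem.List.len mult2)).foldl
          (fun acc2 k =>
            acc2 ++ [[(pterm (PySem.List.pyGetD mult1 c []) (PySem.List.pyGetD mult2 k [])).1,
                      (pterm (PySem.List.pyGetD mult1 c []) (PySem.List.pyGetD mult2 k [])).2]]) acc) []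
    = l2r (termsOf mult1 mult2)
  rw [hfun]
  have h4 := PySem.List.foldl_pyRange_zero_pyGetD mult1 []
    (fun (acc : List (List Int)) (r1 : List Int) =>
      acc ++ (mult2.map (pterm r1)).map (fun p => [p.1, p.2])) []
  rw [h4]
  have h5 := PySem.List.foldl_append_eq_flatMap
    (fun (r1 : List Int) => (mult2.map (pterm r1)).map (fun p => [p.1, p.2])) mult1 []
  rw [h5]
  unfold l2r termsOf
  rw [List.map_flatMap]
  rfl

-- core / aggregation algebra ------------------------------------------------------
lemma sumM_cons (m' c m : Int) (t : List (Int × Int)) :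
    sumM m' ((c, m) :: t) = (if m = m' then c else 0) + sumM m' t := by
  unfold sumM
  by_cases h : m = m' <;> simp [h]

lemma zeroM_cons (m c mm : Int) (t : List (Int × Int)) :
    zeroM m ((c, mm) :: t) = (if mm = m then ((0:Int), mm) else (c, mm)) :: zeroM m t := rfl

lemma core_nil : core [] = [] := by rw [core]

lemma core_cons (c m : Int) (t : List (Int × Int)) :
    core ((c, m) :: t) = (c + sumM m t, m) :: core (zeroM m t) := by rw [core]

lemma length_zeroM (m : Int) (t : List (Int × Int)) : (zeroM m t).length = t.length := by
  simp [zeroM]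

lemma zeroM_zeroM (a b : Int) (t : List (Int × Int)) :
    zeroM a (zeroM b t) = zeroM b (zeroM a t) := by
  induction t with
  | nil => rfl
  | cons p t ih =>
    cases p with | mk pc pm =>
    by_cases h1 : pm = a <;> by_cases h2 : pm = b <;>
      simp [zeroM_cons, h1, h2, ih] <;> split_ifs <;> simp_all [zeroM_cons]

lemma zeroM_self (m : Int) (t : List (Int × Int)) : zeroM m (zeroM m t) = zeroM m t := by
  induction t with
  | nil => rfl
  | cons p t ih =>
    cases p with | mk pc pm =>
    by_cases h : pm = m <;> simp [zeroM_cons, h, ih]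

lemma sumM_zeroM_self (m : Int) (t : List (Int × Int)) : sumM m (zeroM m t) = 0 := by
  induction t with
  | nil => rfl
  | cons p t ih =>
    cases p with | mk pc pm =>
    by_cases h : pm = m <;> simp [zeroM_cons, h, sumM_cons, ih]

lemma sumM_zeroM_ne (m' m : Int) (t : List (Int × Int)) (h : m' ≠ m) :
    sumM m' (zeroM m t) = sumM m' t := by
  induction t with
  | nil => rfl
  | cons p t ih =>
    cases p with | mk pc pm =>
    by_cases h2 : pm = m
    · simp [zeroM_cons, h2, sumM_cons, ih]
      exact fun hh => absurd hh.symm h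
    · simp [zeroM_cons, h2, sumM_cons, ih]

lemma core_zeroM : ∀ (nn : Nat) (t : List (Int × Int)), t.length ≤ nn →
    ∀ m, core (zeroM m t) = zeroM m (core t) := by
  intro nn
  induction nn with
  | zero =>
    intro t ht m
    have ht0 : t = [] := List.length_eq_zero_iff.mp (by omega)
    subst ht0; simp [zeroM, core_nil]
  | succ n ih =>
    intro t ht m
    cases t with
    | nil => simp [zeroM, core_nil]
    | cons p t' =>
      cases p with | mk c m' =>
      have ht' : t'.length ≤ n := by simpa using ht
      by_cases h : m' = m
      · subst h
        rw [zeroM_cons, if_pos rfl, core_cons, core_cons, zeroM_cons, if_pos rfl]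
        rw [sumM_zeroM_self, zeroM_self]
        have ih' := ih (zeroM m' t') (by rw [length_zeroM]; exact ht') m'
        rw [zeroM_self] at ih'
        rw [← ih']
        simp
      · rw [zeroM_cons, if_neg h, core_cons, core_cons, zeroM_cons, if_neg h]
        rw [sumM_zeroM_ne _ _ _ h, zeroM_zeroM]
        have ih' := ih (zeroM m' t') (by rw [length_zeroM]; exact ht') m
        rw [ih']

lemma filter_zeroM (m : Int) (xs : List (Int × Int)) :
    (zeroM m xs).filter (fun p => decide (p.1 ≠ 0))
      = xs.filter (fun p => decide (p.1 ≠ 0) && decide (p.2 ≠ m)) := by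
  induction xs with
  | nil => rfl
  | cons p t ih =>
    cases p with | mk pc pm =>
    by_cases h : pm = m <;> by_cases hc : pc = 0 <;>
      simp_all [zeroM_cons, List.filter_cons]

lemma maskList_cons (c m : Int) (t : List (Int × Int)) :
    maskList ((c, m) :: t) = m :: (maskList t).filter (fun x => !(x == m)) := by
  unfold maskList
  rw [List.map_cons, PySem.Set.ofList_cons]
  rfl

lemma decide_ne_beq (m' m : Int) : decide (m' ≠ m) = !(m' == m) := by
  by_cases hm : m' = m <;> simp [hm]

lemma core_agg (T : List (Int × Int)) :
    (core T).filter (fun p => decide (p.1 ≠ 0)) = aggOf T := by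
  induction T with
  | nil => simp [core_nil, aggOf, maskList, PySem.Set.ofList]
  | cons p t ih =>
    cases p with | mk c m =>
    have hC : ∀ m' ∈ (maskList t).filter (fun m' => !(m' == m) && decide (sumM m' t ≠ 0)),
        sumM m' ((c, m) :: t) = sumM m' t := by
      intro m' hm'
      have hne : (m' == m) = false := by
        have := (List.mem_filter.mp hm').2
        cases hb : (m' == m) <;> simp [hb] at this ⊢
      rw [sumM_cons, if_neg (fun hh => by simp [hh.symm] at hne)]
      ring
    have L1 : (aggOf t).filter (fun p => decide (p.2 ≠ m))
        = ((maskList t).filter (fun m' => !(m' == m) && decide (sumM m' t ≠ 0))).map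
            (fun m' => (sumM m' t, m')) := by
      unfold aggOf
      rw [List.filter_map, List.filter_filter]
      congr 1
      refine List.filter_congr (fun m' _ => ?_)
      simp only [Function.comp]
      rw [decide_ne_beq]
    have L2 : aggOf ((c, m) :: t)
        = if decide (c + sumM m t ≠ 0)
          then (c + sumM m t, m) :: ((maskList t).filter (fun m' => !(m' == m) && decide (sumM m' t ≠ 0))).map
            (fun m' => (sumM m' t, m'))
          else ((maskList t).filter (fun m' => !(m' == m) && decide (sumM m' t ≠ 0))).map
            (fun m' => (sumM m' t, m')) := by
      unfold aggOf
      rw [maskList_cons, List.filter_cons, List.filter_filter]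
      have hpred : (decide (sumM m ((c, m) :: t) ≠ 0)) = decide (c + sumM m t ≠ 0) := by
        rw [sumM_cons, if_pos rfl]
      have hfeq : ((maskList t).filter (fun m' => decide (sumM m' ((c, m) :: t) ≠ 0) && !(m' == m))).map
            (fun m' => (sumM m' ((c, m) :: t), m'))
          = ((maskList t).filter (fun m' => !(m' == m) && decide (sumM m' t ≠ 0))).map
            (fun m' => (sumM m' t, m')) := by
        have hfil : (maskList t).filter (fun m' => decide (sumM m' ((c, m) :: t) ≠ 0) && !(m' == m))
            = (maskList t).filter (fun m' => !(m' == m) && decide (sumM m' t ≠ 0)) := by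
          refine List.filter_congr (fun m' _ => ?_)
          by_cases hb : m' = m
          · simp [hb]
          · rw [sumM_cons, if_neg (fun hh => hb hh.symm)]
            simp [Bool.and_comm]
        rw [hfil]
        exact List.map_congr_left (fun m' hm' => by rw [hC m' hm'])
      rw [hpred]
      by_cases hz : c + sumM m t ≠ 0
      · rw [if_pos (by simpa using hz), if_pos (by simpa using hz), List.map_cons, hfeq]
        congr 1
        rw [sumM_cons, if_pos rfl]
      · rw [if_neg (by simpa using hz), if_neg (by simpa using hz), hfeq]
    have hcomm : (core t).filter (fun p => decide (p.1 ≠ 0) && decide (p.2 ≠ m))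
        = ((core t).filter (fun p => decide (p.1 ≠ 0))).filter (fun p => decide (p.2 ≠ m)) := by
      rw [List.filter_filter]
      exact List.filter_congr (fun p _ => Bool.and_comm _ _)
    rw [core_cons, List.filter_cons, core_zeroM t.length t le_rfl m, filter_zeroM, hcomm, ih, L1, L2]

def dstep (d : PySem.Dict Int Int) (p : Int × Int) : PySem.Dict Int Int :=
  d.insert p.2 (d.getD p.2 0 + p.1)

lemma dict_getD (T : List (Int × Int)) : ∀ (d : PySem.Dict Int Int) (m : Int),
    (T.foldl dstep d).getD m 0 = d.getD m 0 + sumM m T := by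
  induction T with
  | nil => intro d m; simp [sumM]
  | cons p t ih =>
    intro d m
    cases p with | mk c m' =>
    rw [List.foldl_cons, ih, sumM_cons]
    show (d.insert m' (d.getD m' 0 + c)).getD m 0 + sumM m t = _
    rw [PySem.Dict.getD_insert]
    by_cases h : m = m'
    · rw [if_pos h, if_pos h.symm, h]; ring
    · rw [if_neg h, if_neg (fun hh => h hh.symm)]; ring

lemma dict_items (T : List (Int × Int)) :
    (T.foldl dstep PySem.Dict.empty).items = (maskList T).map (fun m => (m, sumM m T)) := by
  have hkeys : (T.foldl dstep PySem.Dict.empty).keys = maskList T := by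
    have h := PySem.Dict.keys_foldl_insert_key T (fun p => p.2)
      (fun d p => d.getD p.2 0 + p.1) PySem.Dict.empty
    have h2 : (List.foldl (fun d x => d.insert x.2 (d.getD x.2 0 + x.1)) PySem.Dict.empty T)
        = T.foldl dstep PySem.Dict.empty := rfl
    rw [h2] at h
    rw [h, PySem.Dict.keys_empty]
    exact PySem.Set.update_empty _
  have hnodup : (T.foldl dstep PySem.Dict.empty).keys.Nodup := by
    have h := PySem.Dict.nodup_keys_foldl_insert_key T (fun p => p.2)
      (fun d p => d.getD p.2 0 + p.1) PySem.Dict.empty (by simp)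
    exact h
  rw [PySem.Dict.items_eq_map_keys _ hnodup 0, hkeys]
  refine List.map_congr_left (fun m _ => ?_)
  rw [dict_getD, PySem.Dict.getD_empty]
  simp

-- B: the dict pass computes aggOf ----------------------------------------------------



lemma ptermB_eq (r1 r2 : List Int) :
    termAlt (PySem.List.pyGetD r1 0 0) (PySem.List.pyGetD r1 1 0)
            (PySem.List.pyGetD r2 0 0) (PySem.List.pyGetD r2 1 0) = pterm r1 r2 := by
  rw [term_eq]; rfl

lemma B_reduce (mult1 mult2 : List (List Int)) :
    pexterno_alt mult1 mult2
      = PySem.List.sorted (l2r (aggOf (termsOf mult1 mult2))) (fun r => PySem.List.pyGetD r 1 0) false := by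
  unfold pexterno_alt
  have hdict : (mult1.foldl (fun acc r1 =>
      mult2.foldl (fun acc r2 =>
        acc.insert (termAlt (PySem.List.pyGetD r1 0 0) (PySem.List.pyGetD r1 1 0)
                            (PySem.List.pyGetD r2 0 0) (PySem.List.pyGetD r2 1 0)).2
          (acc.getD (termAlt (PySem.List.pyGetD r1 0 0) (PySem.List.pyGetD r1 1 0)
                             (PySem.List.pyGetD r2 0 0) (PySem.List.pyGetD r2 1 0)).2 0 +
           (termAlt (PySem.List.pyGetD r1 0 0) (PySem.List.pyGetD r1 1 0)
                    (PySem.List.pyGetD r2 0 0) (PySem.List.pyGetD r2 1 0)).1)) acc) PySem.Dict.empty)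
      = (termsOf mult1 mult2).foldl dstep PySem.Dict.empty := by
    have hfun : (fun (acc : PySem.Dict Int Int) (r1 : List Int) =>
        mult2.foldl (fun acc r2 =>
          acc.insert (termAlt (PySem.List.pyGetD r1 0 0) (PySem.List.pyGetD r1 1 0)
                              (PySem.List.pyGetD r2 0 0) (PySem.List.pyGetD r2 1 0)).2
            (acc.getD (termAlt (PySem.List.pyGetD r1 0 0) (PySem.List.pyGetD r1 1 0)
                               (PySem.List.pyGetD r2 0 0) (PySem.List.pyGetD r2 1 0)).2 0 +
             (termAlt (PySem.List.pyGetD r1 0 0) (PySem.List.pyGetD r1 1 0)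
                      (PySem.List.pyGetD r2 0 0) (PySem.List.pyGetD r2 1 0)).1)) acc)
        = (fun (acc : PySem.Dict Int Int) (r1 : List Int) =>
            List.foldl dstep acc (mult2.map (pterm r1))) := by
      funext acc r1
      have h1 : (fun (acc : PySem.Dict Int Int) (r2 : List Int) => dstep acc (pterm r1 r2))
          = (fun (acc : PySem.Dict Int Int) (r2 : List Int) =>
              acc.insert (termAlt (PySem.List.pyGetD r1 0 0) (PySem.List.pyGetD r1 1 0)
                                  (PySem.List.pyGetD r2 0 0) (PySem.List.pyGetD r2 1 0)).2
                (acc.getD (termAlt (PySem.List.pyGetD r1 0 0) (PySem.List.pyGetD r1 1 0)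
                                   (PySem.List.pyGetD r2 0 0) (PySem.List.pyGetD r2 1 0)).2 0 +
                 (termAlt (PySem.List.pyGetD r1 0 0) (PySem.List.pyGetD r1 1 0)
                          (PySem.List.pyGetD r2 0 0) (PySem.List.pyGetD r2 1 0)).1)) := by
        funext acc r2
        rw [ptermB_eq]
        rfl
      rw [← h1, List.foldl_map]
    rw [hfun]
    rw [← List.foldl_flatMap]
    rfl
  rw [hdict]
  show PySem.List.sorted ((((termsOf mult1 mult2).foldl dstep PySem.Dict.empty).items.filter
        (fun kv => decide (kv.2 ≠ 0))).map (fun kv => [kv.2, kv.1]))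
      (fun r => PySem.List.pyGetD r 1 0) false = _
  rw [dict_items]
  congr 1
  rw [List.filter_map, List.map_map]
  unfold aggOf l2r
  rw [List.map_map]
  rfl

-- A: characterisation of the analisesoma merge loop ---------------------------------
lemma step_len (m : List (List Int)) (c k : Int) : (asomaStep m c k).length = m.length := by
  unfold asomaStep
  split_ifs with h
  · simp [PySem.List.length_pySetD]
  · rfl

lemma foldl_step_len (ks : List Int) (c : Int) (m : List (List Int)) :
    (ks.foldl (fun m' k => asomaStep m' c k) m).length = m.length := by
  induction ks generalizing m with
  | nil => rfl
  | cons k ks ih => simp only [List.foldl_cons, ih, step_len]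

lemma foldl_keep_head {α β : Type} (ks : List β) (F G : List α → β → List α) (r : α)
    (h : ∀ s k, k ∈ ks → F (r :: s) k = r :: G s k) :
    ∀ s, ks.foldl F (r :: s) = r :: ks.foldl G s := by
  induction ks with
  | nil => intro s; rfl
  | cons k ks ih =>
    intro s
    rw [List.foldl_cons, List.foldl_cons, h s k (by simp)]
    exact ih (fun s k hk => h s k (by simp [hk])) _

lemma pyGetD_cons_pos {α : Type} (x : α) (xs : List α) (k : Int) (d : α) (hk : 1 ≤ k) :
    PySem.List.pyGetD (x :: xs) k d = PySem.List.pyGetD xs (k - 1) d := by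
  obtain ⟨j, rfl⟩ : ∃ j : Nat, k = (j : Int) + 1 := ⟨(k - 1).toNat, by omega⟩
  have h2 : ((j : Int) + 1 - 1) = ((j : Nat) : Int) := by push_cast; ring
  have h1 : ((j : Int) + 1) = ((j + 1 : Nat) : Int) := by push_cast; ring
  rw [h2, h1, PySem.List.pyGetD_natCast, PySem.List.pyGetD_natCast, List.getD_cons_succ]

lemma pySetD_cons_pos {α : Type} (x : α) (xs : List α) (k : Int) (v : α) (hk : 1 ≤ k) :
    PySem.List.pySetD (x :: xs) k v = x :: PySem.List.pySetD xs (k - 1) v := by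
  obtain ⟨j, rfl⟩ : ∃ j : Nat, k = (j : Int) + 1 := ⟨(k - 1).toNat, by omega⟩
  have h2 : ((j : Int) + 1 - 1) = ((j : Nat) : Int) := by push_cast; ring
  have h1 : ((j : Int) + 1) = ((j + 1 : Nat) : Int) := by push_cast; ring
  rw [h2, h1, PySem.List.pySetD_natCast, PySem.List.pySetD_natCast]
  rfl

lemma step_cons (r : List Int) (s : List (List Int)) (c k : Int) (hc : 1 ≤ c) (hk : 1 ≤ k) :
    asomaStep (r :: s) c k = r :: asomaStep s (c - 1) (k - 1) := by
  unfold asomaStep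
  rw [pyGetD_cons_pos _ _ k _ hk, pyGetD_cons_pos _ _ c _ hc]
  split_ifs with h
  · rw [pySetD_cons_pos _ _ c _ hc, pySetD_cons_pos _ _ k _ hk,
        pyGetD_cons_pos _ _ k _ hk]
  · rfl

lemma pyRange_map_sub_one (a b : Int) :
    (PySem.List.pyRange a b).map (fun k => k - 1) = PySem.List.pyRange (a - 1) (b - 1) := by
  rw [PySem.List.pyRange_one, PySem.List.pyRange_one, List.map_map]
  have h : (b - 1 - (a - 1)).toNat = (b - a).toNat := by omega
  rw [h]
  exact List.map_congr_left (fun x _ => by simp; ring)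


lemma sumM_append (m : Int) (s t : List (Int × Int)) :
    sumM m (s ++ t) = sumM m s + sumM m t := by
  simp [sumM, List.filter_append]

lemma zeroM_append (m : Int) (s t : List (Int × Int)) :
    zeroM m (s ++ t) = zeroM m s ++ zeroM m t := by
  simp [zeroM]


lemma l2r_cons (p : Int × Int) (t : List (Int × Int)) :
    l2r (p :: t) = [p.1, p.2] :: l2r t := rfl

lemma l2r_append (s t : List (Int × Int)) : l2r (s ++ t) = l2r s ++ l2r t := by
  unfold l2r; rw [List.map_append]

-- one merge-loop step at row 0 and row 1+j, evaluated on a decomposed pair list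
lemma asomaStep_eval (r0 p : Int × Int) (Z D : List (Int × Int)) (j : Nat) (hZ : Z.length = j) :
    asomaStep (l2r (r0 :: (Z ++ p :: D))) 0 (1 + (j : Int))
      = if p.2 = r0.2 then l2r ((r0.1 + p.1, r0.2) :: (Z ++ ((0 : Int), p.2) :: D))
        else l2r (r0 :: (Z ++ p :: D)) := by
  have hlen : (l2r Z).length = j := by unfold l2r; rw [List.length_map, hZ]
  have hrowk : PySem.List.pyGetD (l2r (r0 :: (Z ++ p :: D))) (1 + (j : Int)) [] = [p.1, p.2] := by
    rw [l2r_cons, pyGetD_cons_pos _ _ _ _ (by omega),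
        show (1 + (j : Int) - 1) = ((j : Nat) : Int) by push_cast; ring,
        PySem.List.pyGetD_natCast, l2r_append, l2r_cons,
        List.getD_append_right _ _ _ _ (by omega), show j - (l2r Z).length = 0 by omega]
    rfl
  have hrowc : PySem.List.pyGetD (l2r (r0 :: (Z ++ p :: D))) 0 [] = [r0.1, r0.2] := by
    rw [l2r_cons]; exact PySem.List.pyGetD_zero_cons _ _ _
  unfold asomaStep
  rw [hrowk, hrowc]
  by_cases heq : p.2 = r0.2
  · rw [if_pos (by simpa using heq), if_pos heq]
    have hset0 : PySem.List.pySetD (l2r (r0 :: (Z ++ p :: D))) 0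
          (PySem.List.pySetD [r0.1, r0.2] 0
            (PySem.List.pyGetD [r0.1, r0.2] 0 0 + PySem.List.pyGetD [p.1, p.2] 0 0))
        = l2r ((r0.1 + p.1, r0.2) :: (Z ++ p :: D)) := by
      rw [show (0 : Int) = ((0 : Nat) : Int) by norm_num, PySem.List.pySetD_natCast]
      rfl
    rw [hset0]
    have hrowk2 : PySem.List.pyGetD (l2r ((r0.1 + p.1, r0.2) :: (Z ++ p :: D))) (1 + (j : Int)) []
        = [p.1, p.2] := by
      rw [l2r_cons, pyGetD_cons_pos _ _ _ _ (by omega),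
          show (1 + (j : Int) - 1) = ((j : Nat) : Int) by push_cast; ring,
          PySem.List.pyGetD_natCast, l2r_append, l2r_cons,
          List.getD_append_right _ _ _ _ (by omega), show j - (l2r Z).length = 0 by omega]
      rfl
    show PySem.List.pySetD (l2r ((r0.1 + p.1, r0.2) :: (Z ++ p :: D))) (1 + (j : Int))
        (PySem.List.pySetD
          (PySem.List.pyGetD (l2r ((r0.1 + p.1, r0.2) :: (Z ++ p :: D))) (1 + (j : Int)) []) 0 0)
      = _
    rw [hrowk2, l2r_cons, pySetD_cons_pos _ _ _ _ (by omega),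
        show (1 + (j : Int) - 1) = ((j : Nat) : Int) by push_cast; ring,
        PySem.List.pySetD_natCast, l2r_append, l2r_cons,
        List.set_append_right _ _ (by omega), show j - (l2r Z).length = 0 by omega]
    rw [show ([p.1, p.2] :: l2r D).set 0 (PySem.List.pySetD [p.1, p.2] 0 0)
          = PySem.List.pySetD [p.1, p.2] 0 0 :: l2r D from rfl]
    rw [show PySem.List.pySetD [p.1, p.2] 0 0 = [(0 : Int), p.2] from rfl]
    rw [l2r_cons, l2r_append, l2r_cons]
  · rw [if_neg (by simpa using heq), if_neg heq]

-- inner loop at c = 0 zeroes the duplicates of the head's mask into the head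
lemma inner_zero (j : Nat) : ∀ (T : List (Int × Int)) (c0 m0 : Int), j ≤ T.length →
    (PySem.List.pyRange 1 (1 + (j : Int))).foldl (fun m k => asomaStep m 0 k) (l2r ((c0, m0) :: T))
      = l2r ((c0 + sumM m0 (T.take j), m0) :: (zeroM m0 (T.take j) ++ T.drop j)) := by
  induction j with
  | zero =>
    intro T c0 m0 _
    rw [show (1 + ((0 : Nat) : Int)) = 1 by norm_num, PySem.List.pyRange_one_eq_nil le_rfl,
        List.foldl_nil, List.take_zero, List.drop_zero,
        show sumM m0 [] = 0 from rfl, add_zero,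
        show zeroM m0 [] = ([] : List (Int × Int)) from rfl, List.nil_append]
  | succ j ih =>
    intro T c0 m0 hj
    have hj' : j ≤ T.length := by omega
    have hjlt : j < T.length := by omega
    have hcast : (1 + ((j + 1 : Nat) : Int)) = (1 + (j : Int)) + 1 := by push_cast; ring
    rw [hcast, PySem.List.pyRange_one_succ_right (by omega), List.foldl_append,
        List.foldl_cons, List.foldl_nil, ih T c0 m0 hj']
    obtain ⟨p, D', hD⟩ : ∃ p D', T.drop j = p :: D' := by
      cases hd : T.drop j with
      | nil => exfalso; have := List.length_drop (l := T) (i := j); rw [hd] at this; simp at this; omega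
      | cons p D' => exact ⟨p, D', rfl⟩
    have hD' : D' = T.drop (j + 1) := by
      have h1 : (T.drop j).tail = T.drop (j + 1) := by
        rw [← List.drop_one, List.drop_drop]
      rw [hD] at h1
      simpa using h1
    have hZlen : (zeroM m0 (T.take j)).length = j := by
      rw [length_zeroM, List.length_take]; omega
    rw [hD, asomaStep_eval (c0 + sumM m0 (T.take j), m0) p (zeroM m0 (T.take j)) D' j hZlen]
    have htake : T.take (j + 1) = T.take j ++ [p] := by
      rw [show j + 1 = j + 1 from rfl, List.take_add, hD]
      rfl
    rw [htake, sumM_append, zeroM_append]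
    by_cases heq : p.2 = m0
    · rw [if_pos heq]
      rw [show sumM m0 [p] = p.1 by simp [sumM, heq],
          show zeroM m0 [p] = [((0 : Int), p.2)] by simp [zeroM, heq],
          List.append_assoc, List.singleton_append, hD']
      rw [show c0 + sumM m0 (T.take j) + p.1 = c0 + (sumM m0 (T.take j) + p.1) by ring]
    · rw [if_neg heq]
      rw [show sumM m0 [p] = 0 by simp [sumM, heq],
          show zeroM m0 [p] = [p] by simp [zeroM, heq],
          List.append_assoc, List.singleton_append, hD', add_zero]

lemma fix_core : ∀ (nn : Nat) (T : List (Int × Int)), T.length ≤ nn →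
    asomaFix (T.length : Int) (l2r T) = l2r (core T) := by
  intro nn
  induction nn with
  | zero =>
    intro T hT
    have h0 : T = [] := List.length_eq_zero_iff.mp (by omega)
    subst h0
    unfold asomaFix
    rw [show (([] : List (Int × Int)).length : Int) = 0 from rfl,
        PySem.List.pyRange_one_eq_nil le_rfl, List.foldl_nil, core_nil]
  | succ n ih =>
    intro T hT
    cases T with
    | nil =>
      unfold asomaFix
      rw [show (([] : List (Int × Int)).length : Int) = 0 from rfl,
          PySem.List.pyRange_one_eq_nil le_rfl, List.foldl_nil, core_nil]
    | cons p t =>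
      cases p with | mk c0 m0 =>
      have ht : t.length ≤ n := by simpa using hT
      set N := (t.length : Int) with hN
      have hlen : (((c0, m0) :: t).length : Int) = N + 1 := by
        rw [hN]; push_cast [List.length_cons]; ring
      unfold asomaFix
      rw [hlen, PySem.List.pyRange_one_cons (by omega), List.foldl_cons]
      -- first outer iteration (c = 0) is the inner_zero pass
      have hfirst : (PySem.List.pyRange (0 + 1) (N + 1)).foldl
            (fun m' k => asomaStep m' 0 k) (l2r ((c0, m0) :: t))
          = l2r ((c0 + sumM m0 t, m0) :: zeroM m0 t) := by
        rw [show ((0 : Int) + 1) = 1 by norm_num, show (N + 1) = 1 + (t.length : Int) by rw [hN]; ring,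
            inner_zero t.length t c0 m0 le_rfl, List.take_length, List.drop_length,
            List.append_nil]
      rw [hfirst, l2r_cons, show ((0 : Int) + 1) = 1 by norm_num]
      -- the remaining outer iterations act below row 0: shift them onto the tail
      have hshift : ∀ (s : List (List Int)) (c : Int), c ∈ PySem.List.pyRange 1 (N + 1) →
          (PySem.List.pyRange (c + 1) (N + 1)).foldl (fun m' k => asomaStep m' c k)
              ([c0 + sumM m0 t, m0] :: s)
            = [c0 + sumM m0 t, m0] ::
              (PySem.List.pyRange ((c - 1) + 1) N).foldl (fun m' k => asomaStep m' (c - 1) k) s := by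
        intro s c hc
        have hc1 : 1 ≤ c := (PySem.List.mem_pyRange_one.mp hc).1
        rw [foldl_keep_head _ _ (fun m' k => asomaStep m' (c - 1) (k - 1)) _
            (fun s' k hk => step_cons _ _ _ _ hc1 (by
              have := (PySem.List.mem_pyRange_one.mp hk).1; omega)) s]
        congr 1
        rw [← List.foldl_map (f := fun k => k - 1) (g := fun m' k => asomaStep m' (c - 1) k),
            pyRange_map_sub_one]
        congr 1
        ring
      rw [foldl_keep_head (PySem.List.pyRange 1 (N + 1)) _
          (fun s c => (PySem.List.pyRange ((c - 1) + 1) N).foldl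
            (fun m' k => asomaStep m' (c - 1) k) s) _ hshift (l2r (zeroM m0 t))]
      rw [← List.foldl_map (f := fun c => c - 1)
            (g := fun s c => (PySem.List.pyRange (c + 1) N).foldl (fun m' k => asomaStep m' c k) s),
          pyRange_map_sub_one,
          show (1 : Int) - 1 = 0 by norm_num, show N + 1 - 1 = N by ring]
      have hfix : (PySem.List.pyRange 0 N).foldl
            (fun s c => (PySem.List.pyRange (c + 1) N).foldl (fun m' k => asomaStep m' c k) s)
            (l2r (zeroM m0 t))
          = l2r (core (zeroM m0 t)) := by
        have hzl : ((zeroM m0 t).length : Int) = N := by rw [length_zeroM, hN]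
        have := ih (zeroM m0 t) (by rw [length_zeroM]; exact ht)
        unfold asomaFix at this
        rw [hzl] at this
        exact this
      rw [hfix, core_cons]
      rfl

lemma asoma_spec (T : List (Int × Int)) :
    analisesoma (l2r T)
      = PySem.List.sorted (l2r ((core T).filter (fun p => decide (p.1 ≠ 0)))) sortSecond false := by
  have hl2rlen : (l2r T).length = T.length := by unfold l2r; rw [List.length_map]
  have hcong : ∀ (l : List Int) (m : List (List Int)), m.length = T.length →
      l.foldl (fun m c => (PySem.List.pyRange (c + 1) (PySem.List.len m)).foldl
          (fun m' k => asomaStep m' c k) m) m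
        = l.foldl (fun m c => (PySem.List.pyRange (c + 1) ((T.length : Nat) : Int)).foldl
          (fun m' k => asomaStep m' c k) m) m := by
    intro l
    induction l with
    | nil => intro m _; rfl
    | cons c l ihl =>
      intro m hm
      rw [List.foldl_cons, List.foldl_cons,
          show PySem.List.len m = ((T.length : Nat) : Int) by rw [PySem.List.len_eq, hm]]
      exact ihl _ (by rw [foldl_step_len]; exact hm)
  have hmain : (PySem.List.pyRange 0 (PySem.List.len (l2r T))).foldl
        (fun m c => (PySem.List.pyRange (c + 1) (PySem.List.len m)).foldl
          (fun m' k => asomaStep m' c k) m) (l2r T)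
      = l2r (core T) := by
    rw [show PySem.List.len (l2r T) = ((T.length : Nat) : Int) by rw [PySem.List.len_eq, hl2rlen]]
    rw [hcong _ _ hl2rlen]
    have h := fix_core T.length T le_rfl
    unfold asomaFix at h
    exact h
  have hcol : (PySem.List.pyRange 0 (PySem.List.len (l2r (core T)))).foldl
        (fun acc c =>
          if PySem.List.pyGetD (PySem.List.pyGetD (l2r (core T)) c []) 0 0 ≠ 0 then
            acc ++ [[PySem.List.pyGetD (PySem.List.pyGetD (l2r (core T)) c []) 0 0,
                     PySem.List.pyGetD (PySem.List.pyGetD (l2r (core T)) c []) 1 0]]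
          else acc) []
      = l2r ((core T).filter (fun p => decide (p.1 ≠ 0))) := by
    have h1 := PySem.List.foldl_pyRange_zero_pyGetD (l2r (core T)) []
      (fun acc r => if PySem.List.pyGetD r 0 0 ≠ 0 then
        acc ++ [[PySem.List.pyGetD r 0 0, PySem.List.pyGetD r 1 0]] else acc) []
    have h2 := PySem.List.foldl_append_ite (fun r => PySem.List.pyGetD r 0 0 ≠ 0)
      (fun r => [PySem.List.pyGetD r 0 0, PySem.List.pyGetD r 1 0]) (l2r (core T)) []
    have h3 : ((l2r (core T)).filter (fun r => decide (PySem.List.pyGetD r 0 0 ≠ 0))).map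
          (fun r => [PySem.List.pyGetD r 0 0, PySem.List.pyGetD r 1 0])
        = l2r ((core T).filter (fun p => decide (p.1 ≠ 0))) := by
      unfold l2r
      rw [List.filter_map, List.map_map]
      rfl
    exact h1.trans (h2.trans (by rw [h3]; rfl))
  show PySem.List.sorted
      ((PySem.List.pyRange 0 (PySem.List.len ((PySem.List.pyRange 0 (PySem.List.len (l2r T))).foldl
        (fun m c => (PySem.List.pyRange (c + 1) (PySem.List.len m)).foldl
          (fun m' k => asomaStep m' c k) m) (l2r T)))).foldl
        (fun acc c =>
          if PySem.List.pyGetD (PySem.List.pyGetD ((PySem.List.pyRange 0 (PySem.List.len (l2r T))).foldl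
              (fun m c => (PySem.List.pyRange (c + 1) (PySem.List.len m)).foldl
                (fun m' k => asomaStep m' c k) m) (l2r T)) c []) 0 0 ≠ 0 then
            acc ++ [[PySem.List.pyGetD (PySem.List.pyGetD ((PySem.List.pyRange 0 (PySem.List.len (l2r T))).foldl
                (fun m c => (PySem.List.pyRange (c + 1) (PySem.List.len m)).foldl
                  (fun m' k => asomaStep m' c k) m) (l2r T)) c []) 0 0,
                     PySem.List.pyGetD (PySem.List.pyGetD ((PySem.List.pyRange 0 (PySem.List.len (l2r T))).foldl
                (fun m c => (PySem.List.pyRange (c + 1) (PySem.List.len m)).foldl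
                  (fun m' k => asomaStep m' c k) m) (l2r T)) c []) 1 0]]
          else acc) [])
      sortSecond false = _
  rw [hmain, hcol]


-- ===== VERDICT (by name: the statement is the Claim_ definition above) =====
theorem pexterno_spec : Claim_equal_pexterno := by
  intro mult1 mult2 _dom _pre
  unfold Spec_pexterno
  rw [A_terms, asoma_spec, core_agg, B_reduce]
  rfl
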